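-- pv_equiv track=rewrite | github.com/Mahdi-Chaouch/alternance-hunter | backend_api.py | extract_command_secrets
-- ===== SOURCE A (Python) =====
-- from typing import Deque, Dict, List, Literal, Optional, Union
--
-- SENSITIVE_CLI_FLAGS = {
--     "--oauth-access-token",
--     "--oauth-refresh-token",
--     "--oauth-client-secret",
-- }
--
-- def extract_command_secrets(command: List[str]) -> List[str]:
--     secrets: List[str] = []
--     for idx, part in enumerate(command):
--         if "=" in part:
--             maybe_flag, value = part.split("=", 1)
--             if maybe_flag in SENSITIVE_CLI_FLAGS and value:
--                 secrets.append(value)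
--             continue
--         if part in SENSITIVE_CLI_FLAGS and idx + 1 < len(command):
--             value = command[idx + 1]
--             if value:
--                 secrets.append(value)
--     return secrets
-- ===== SOURCE B (Python) =====
-- from typing import List
--
-- SENSITIVE_CLI_FLAGS = {
--     "--oauth-access-token",
--     "--oauth-refresh-token",
--     "--oauth-client-secret",
-- }
--
-- def extract_command_secrets(command: List[str]) -> List[str]:
--     # Single lookbehind state machine: no enumerate, no indexing, no lookahead.
--     secrets: List[str] = []
--     prev_flag = False
--     for part in command:
--         if prev_flag and part:
--             secrets.append(part)
--         if "=" in part:
--             flag, value = part.split("=", 1)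
--             if flag in SENSITIVE_CLI_FLAGS and value:
--                 secrets.append(value)
--         prev_flag = part in SENSITIVE_CLI_FLAGS
--     return secrets
-- ===== Notes on version B (the rewrite author's own statement) =====
-- stated objective: alternative
-- what changed: Replaced the index-based forward lookahead (enumerate + command[idx+1] with a bounds check and continue) by a lookbehind state machine that carries a prev_flag boolean, eliminating all indexing.
import Mathlib
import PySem

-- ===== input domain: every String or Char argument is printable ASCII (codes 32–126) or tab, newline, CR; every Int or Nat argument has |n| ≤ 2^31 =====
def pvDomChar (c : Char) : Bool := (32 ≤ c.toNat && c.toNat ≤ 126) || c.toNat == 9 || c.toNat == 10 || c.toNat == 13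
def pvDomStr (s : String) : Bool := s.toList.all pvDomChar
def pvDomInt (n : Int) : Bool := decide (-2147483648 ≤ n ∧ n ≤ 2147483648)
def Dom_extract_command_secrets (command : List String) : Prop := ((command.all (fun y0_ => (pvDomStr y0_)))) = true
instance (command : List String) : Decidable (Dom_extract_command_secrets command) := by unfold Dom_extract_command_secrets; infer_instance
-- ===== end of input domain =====

-- B replaces A's index-based forward lookahead by a lookbehind state machine carrying a prev_flag boolean (objective: alternative, same O(n) cost).

-- ===== PORT A =====
def SENSITIVE_CLI_FLAGS : List String :=
  ["--oauth-access-token", "--oauth-refresh-token", "--oauth-client-secret"]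

-- A's loop body, over (idx, part) pairs from enumerate, closing over the full command for the lookahead
def pvStepA (command : List String) (secrets : List String) (p : Int × String) : List String :=
  let idx := p.1
  let part := p.2
  if PySem.Str.isIn "=" part then
    let pieces := (PySem.Str.splitMax? part "=" 1).getD []
    let maybe_flag := pieces.getD 0 ""
    let value := pieces.getD 1 ""
    if SENSITIVE_CLI_FLAGS.contains maybe_flag && value != "" then secrets ++ [value] else secrets
  else if SENSITIVE_CLI_FLAGS.contains part && idx + 1 < (command.length : Int) then
    let value := (PySem.List.pyGet? command (idx + 1)).getD ""
    if value != "" then secrets ++ [value] else secrets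
  else secrets

def extract_command_secrets (command : List String) : List String :=
  (PySem.List.enumerate command).foldl (pvStepA command) []

-- ===== PORT B =====
-- B's loop body: state = (secrets so far, was the previous token a bare sensitive flag)
def pvStepB (st : List String × Bool) (part : String) : List String × Bool :=
  let secrets := if st.2 && part != "" then st.1 ++ [part] else st.1
  let secrets :=
    if PySem.Str.isIn "=" part then
      let pieces := (PySem.Str.splitMax? part "=" 1).getD []
      let flag := pieces.getD 0 ""
      let value := pieces.getD 1 ""
      if SENSITIVE_CLI_FLAGS.contains flag && value != "" then secrets ++ [value] else secrets
    else secrets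
  (secrets, SENSITIVE_CLI_FLAGS.contains part)

def extract_command_secrets_alt (command : List String) : List String :=
  (command.foldl pvStepB (([] : List String), false)).1

-- ===== PRECONDITION & SPEC =====
def Spec_extract_command_secrets (command : List String) (out : List String) : Prop := out = extract_command_secrets_alt command
instance (command : List String) (out : List String) : Decidable (Spec_extract_command_secrets command out) := by unfold Spec_extract_command_secrets; infer_instance

-- ===== CLAIM (what is proved, stated in full; the proofs are below) =====
def Claim_equal_extract_command_secrets : Prop := ∀ (command : List String), Dom_extract_command_secrets command → Spec_extract_command_secrets command (extract_command_secrets command)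

-- ===== LEMMAS AND PROOFS =====

-- the '=' (flag=value) contribution of a single token, shared by both loop bodies
def pvEqc (part : String) : List String :=
  if PySem.Str.isIn "=" part then
    let pieces := (PySem.Str.splitMax? part "=" 1).getD []
    if SENSITIVE_CLI_FLAGS.contains (pieces.getD 0 "") && pieces.getD 1 "" != "" then [pieces.getD 1 ""] else []
  else []

-- the lookahead/lookbehind contribution: [u] when the flag bit is set and the next token u is nonempty
def pvLook (b : Bool) : List String → List String
  | [] => []
  | u :: _ => if b && u != "" then [u] else []

-- canonical per-list result both ports are reduced to
def pvG : List String → List String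
  | [] => []
  | t :: rest => pvEqc t ++ pvLook (SENSITIVE_CLI_FLAGS.contains t) rest ++ pvG rest

lemma pv_sens_no_eq (t : String) (h : t ∈ SENSITIVE_CLI_FLAGS) :
    PySem.Str.isIn "=" t = false := by
  simp [SENSITIVE_CLI_FLAGS] at h
  rcases h with h | h | h <;> subst h <;> decide

lemma pvStepA_eq (cmd : List String) (acc : List String) (k : Nat) (t : String) (rest : List String)
    (h : cmd.drop k = t :: rest) :
    pvStepA cmd acc ((k : Int), t) = acc ++ pvEqc t ++ pvLook (SENSITIVE_CLI_FLAGS.contains t) rest := by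
  have hlen : cmd.length = k + 1 + rest.length := by
    have := List.length_drop (l := cmd) (i := k)
    rw [h] at this
    simp at this
    omega
  by_cases he : PySem.Str.isIn "=" t = true
  · have hc : t ∉ SENSITIVE_CLI_FLAGS := by
      intro hm
      rw [pv_sens_no_eq t hm] at he
      exact absurd he (by decide)
    cases rest <;>
      (simp only [pvStepA, pvEqc, pvLook, he, if_true]; split_ifs <;> simp_all)
  · simp at he
    cases rest with
    | nil =>
      have hlen1 : cmd.length = k + 1 := by simpa using hlen
      have hnl : ¬ ((k : Int) + 1 < (cmd.length : Int)) := by omega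
      simp [pvStepA, pvEqc, pvLook, he, hnl]
    | cons u rs =>
      have hlen2 : cmd.length = k + 2 + rs.length := by simp at hlen; omega
      have hlt : ((k : Int) + 1 < (cmd.length : Int)) := by omega
      have hget : PySem.List.pyGet? cmd ((k : Int) + 1) = some u := by
        have h1 : ((k : Int) + 1) = ((k + 1 : Nat) : Int) := by push_cast; ring
        rw [h1, PySem.List.pyGet?_natCast]
        have : cmd.drop (k + 1) = u :: rs := by
          have := congrArg (List.drop 1) h
          rwa [List.drop_drop] at this
        rw [← List.head?_drop, this]
        rfl
      by_cases hc : SENSITIVE_CLI_FLAGS.contains t = true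
      · simp [pvStepA, pvEqc, pvLook, he, hget, hlt]
        split_ifs <;> simp_all
      · simp at hc
        simp [pvStepA, pvEqc, pvLook, he, hc]

lemma pvA_fold (cmd : List String) :
    ∀ (l : List String) (k : Nat) (acc : List String), cmd.drop k = l →
      (PySem.List.enumerate l (k : Int)).foldl (pvStepA cmd) acc = acc ++ pvG l := by
  intro l
  induction l with
  | nil => intro k acc _; simp [PySem.List.enumerate_nil, pvG]
  | cons t rest ih =>
    intro k acc h
    have hrest : cmd.drop (k + 1) = rest := by
      have := congrArg (List.drop 1) h
      rwa [List.drop_drop] at this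
    rw [PySem.List.enumerate_cons, List.foldl_cons]
    have h1 : ((k : Int) + 1) = ((k + 1 : Nat) : Int) := by push_cast; ring
    rw [h1, ih (k + 1) _ hrest, pvStepA_eq cmd acc k t rest h, pvG]
    simp

lemma pvB_fold : ∀ (l : List String) (acc : List String) (prev : Bool),
    (l.foldl pvStepB (acc, prev)).1 = acc ++ pvLook prev l ++ pvG l := by
  intro l
  induction l with
  | nil => intro acc prev; simp [pvLook, pvG]
  | cons t rest ih =>
    intro acc prev
    rw [List.foldl_cons]
    have hstep : pvStepB (acc, prev) t =
        (acc ++ pvLook prev (t :: rest) ++ pvEqc t, SENSITIVE_CLI_FLAGS.contains t) := by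
      simp only [pvStepB, pvLook, pvEqc]
      split_ifs <;> simp
    rw [hstep, ih, pvG]
    simp [pvLook]

-- ===== VERDICT (by name: the statement is the Claim_ definition above) =====
theorem extract_command_secrets_spec : Claim_equal_extract_command_secrets := by
  intro command _
  unfold Spec_extract_command_secrets extract_command_secrets extract_command_secrets_alt
  rw [show (PySem.List.enumerate command) = PySem.List.enumerate command ((0 : Nat) : Int) by norm_num,
    pvA_fold command command 0 [] (by simp), pvB_fold command [] false]
  cases command <;> simp [pvLook]
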